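-- pv_equiv track=rewrite | github.com/florinsalasan/AdventOfCode | day13/smudge.py | check_in_between
-- ===== SOURCE A (Python) =====
-- def compare_lines(line1, line2):
--     count_diff = 0
--     for i in range(len(line1)):
--         if line1[i] != line2[i]:
--             count_diff += 1
--     return count_diff
--
-- def check_in_between(reflection_type, grid, increment_this, decrement_this):
--     increment_this += 1
--     decrement_this -= 1
--     count = 0
--     if reflection_type == 'vertical':
--         # need to create the vertical lines to compare against each other
--         while (decrement_this - increment_this) >= 1:
--             line1, line2 = create_verts(grid, increment_this, decrement_this)
--             checked_pair = compare_lines(line1, line2)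
--             return checked_pair + check_in_between('vertical', grid, increment_this, decrement_this)
--     else:
--         while (decrement_this - increment_this) >= 1:
--             line1, line2 = grid[increment_this], grid[decrement_this]
--             checked_pair = compare_lines(line1, line2)
--             return checked_pair + check_in_between('horizontal', grid, increment_this, decrement_this)
--
--     return count
--
-- def create_verts(grid, top_idx, bottom_idx):
--     top_line = []
--     bottom_line = []
--     for i in range(len(grid)):
--         top_line.append(grid[i][top_idx])
--         bottom_line.append(grid[i][bottom_idx])
--     return top_line, bottom_line
-- ===== SOURCE B (Python) =====
-- def check_in_between(reflection_type, grid, increment_this, decrement_this):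
--     lo = increment_this + 1
--     hi = decrement_this - 1
--     count = 0
--     while hi - lo >= 1:
--         if reflection_type == 'vertical':
--             line1 = [row[lo] for row in grid]
--             line2 = [row[hi] for row in grid]
--         else:
--             line1, line2 = grid[lo], grid[hi]
--         count += sum(1 for i in range(len(line1)) if line1[i] != line2[i])
--         lo += 1
--         hi -= 1
--     return count
-- ===== Notes on version B (the rewrite author's own statement) =====
-- stated objective: simpler
-- what changed: Replaces A's tail recursion (entered through a while-loop that always returns on its first iteration) with a single iterative two-pointer loop over an accumulator, building column pairs with list comprehensions instead of create_verts's index/append loop.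
import Mathlib
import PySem

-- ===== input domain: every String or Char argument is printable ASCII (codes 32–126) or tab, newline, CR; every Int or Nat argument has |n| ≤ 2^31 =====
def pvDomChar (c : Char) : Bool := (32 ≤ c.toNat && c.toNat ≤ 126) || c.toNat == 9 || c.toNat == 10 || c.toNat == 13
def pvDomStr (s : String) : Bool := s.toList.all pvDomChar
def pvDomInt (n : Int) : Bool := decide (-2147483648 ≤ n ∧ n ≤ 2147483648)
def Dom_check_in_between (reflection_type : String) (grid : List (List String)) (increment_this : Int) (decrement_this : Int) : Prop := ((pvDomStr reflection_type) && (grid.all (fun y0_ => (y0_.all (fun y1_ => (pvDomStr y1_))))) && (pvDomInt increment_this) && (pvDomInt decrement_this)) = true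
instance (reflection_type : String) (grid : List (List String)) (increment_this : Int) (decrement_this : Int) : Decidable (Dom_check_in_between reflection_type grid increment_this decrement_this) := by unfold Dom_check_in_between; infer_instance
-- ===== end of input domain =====

-- B replaces A's tail recursion with one iterative two-pointer loop and an accumulator (objective: simpler).
-- ===== PORT A =====
def compare_lines (line1 line2 : List String) : Int :=
  (PySem.List.pyRange 0 (line1.length : Int) 1).foldl
    (fun count_diff i =>
      if PySem.List.pyGetD line1 i "" != PySem.List.pyGetD line2 i "" then count_diff + 1
      else count_diff) 0

def create_verts (grid : List (List String)) (top_idx bottom_idx : Int) : List String × List String :=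
  (PySem.List.pyRange 0 (grid.length : Int) 1).foldl
    (fun (p : List String × List String) i =>
      (p.1 ++ [PySem.List.pyGetD (PySem.List.pyGetD grid i []) top_idx ""],
       p.2 ++ [PySem.List.pyGetD (PySem.List.pyGetD grid i []) bottom_idx ""]))
    ([], [])

def check_in_between (reflection_type : String) (grid : List (List String)) (increment_this : Int) (decrement_this : Int) : Int :=
  if reflection_type = "vertical" then
    if decrement_this - 1 - (increment_this + 1) ≥ 1 then
      let p := create_verts grid (increment_this + 1) (decrement_this - 1)
      compare_lines p.1 p.2 + check_in_between "vertical" grid (increment_this + 1) (decrement_this - 1)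
    else 0
  else
    if decrement_this - 1 - (increment_this + 1) ≥ 1 then
      compare_lines (PySem.List.pyGetD grid (increment_this + 1) [])
          (PySem.List.pyGetD grid (decrement_this - 1) []) +
        check_in_between "horizontal" grid (increment_this + 1) (decrement_this - 1)
    else 0
termination_by (decrement_this - increment_this).toNat
decreasing_by all_goals omega

-- ===== PORT B =====
def pvCountDiffs (line1 line2 : List String) : Int :=
  ((PySem.List.pyRange 0 (line1.length : Int) 1).map
    (fun i => if PySem.List.pyGetD line1 i "" != PySem.List.pyGetD line2 i "" then (1 : Int) else 0)).sum

def pvAltLoop (reflection_type : String) (grid : List (List String)) (lo hi count : Int) : Int :=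
  if hi - lo ≥ 1 then
    pvAltLoop reflection_type grid (lo + 1) (hi - 1) (count + pvCountDiffs
      (if reflection_type = "vertical"
        then grid.map (fun row => PySem.List.pyGetD row lo "") else PySem.List.pyGetD grid lo [])
      (if reflection_type = "vertical"
        then grid.map (fun row => PySem.List.pyGetD row hi "") else PySem.List.pyGetD grid hi []))
  else count
termination_by (hi - lo).toNat
decreasing_by omega

def check_in_between_alt (reflection_type : String) (grid : List (List String)) (increment_this : Int) (decrement_this : Int) : Int :=
  pvAltLoop reflection_type grid (increment_this + 1) (decrement_this - 1) 0

-- ===== PRECONDITION & SPEC =====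
-- length of the row at Python index j (negative indices wrap, like Python's grid[j])
def pvRowLen (grid : List (List String)) (j : Int) : Int :=
  ((PySem.List.pyGetD grid j []).length : Int)

-- Pre_ excludes exactly the inputs on which A raises IndexError: when the loop runs (3 ≤ dec − inc),
-- the two reflection indices must be valid Python indices (into every row for 'vertical', into the grid
-- otherwise), and in the non-vertical branch each later row of a compared pair must be at least as long
-- as the earlier one (compare_lines indexes line2 by line1's length).
def Pre_check_in_between (reflection_type : String) (grid : List (List String)) (increment_this : Int) (decrement_this : Int) : Prop :=
  3 ≤ decrement_this - increment_this →
    (if reflection_type = "vertical" then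
      ∀ r ∈ grid, -(r.length : Int) ≤ increment_this + 1 ∧ decrement_this - 1 < (r.length : Int)
    else
      -(grid.length : Int) ≤ increment_this + 1 ∧ decrement_this - 1 < (grid.length : Int) ∧
      ∀ k ∈ List.range ((decrement_this - increment_this - 1).toNat / 2),
        pvRowLen grid (increment_this + (k : Int) + 1) ≤ pvRowLen grid (decrement_this - (k : Int) - 1))

instance (reflection_type : String) (grid : List (List String)) (increment_this : Int) (decrement_this : Int) : Decidable (Pre_check_in_between reflection_type grid increment_this decrement_this) := by unfold Pre_check_in_between; infer_instance

def pvWitness_check_in_between : String × List (List String) × Int × Int :=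
  ("horizontal", [["#"], ["."], ["#"]], -1, 3)

def Spec_check_in_between (reflection_type : String) (grid : List (List String)) (increment_this : Int) (decrement_this : Int) (out : Int) : Prop := out = check_in_between_alt reflection_type grid increment_this decrement_this
instance (reflection_type : String) (grid : List (List String)) (increment_this : Int) (decrement_this : Int) (out : Int) : Decidable (Spec_check_in_between reflection_type grid increment_this decrement_this out) := by unfold Spec_check_in_between; infer_instance

-- ===== CLAIM (what is proved, stated in full; the proofs are below) =====
def Claim_equal_check_in_between : Prop := ∀ (reflection_type : String) (grid : List (List String)) (increment_this : Int) (decrement_this : Int), Dom_check_in_between reflection_type grid increment_this decrement_this → Pre_check_in_between reflection_type grid increment_this decrement_this → Spec_check_in_between reflection_type grid increment_this decrement_this (check_in_between reflection_type grid increment_this decrement_this)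

-- ===== LEMMAS AND PROOFS =====

-- both diff counters count the same predicate over the same index set
lemma compare_eq_count (line1 line2 : List String) :
    compare_lines line1 line2 = pvCountDiffs line1 line2 := by
  unfold compare_lines pvCountDiffs
  rw [PySem.List.foldl_count_if, PySem.List.sum_map_ite_one_zero]
  omega

-- create_verts builds exactly the two column maps B uses
lemma create_verts_eq_maps (grid : List (List String)) (t b : Int) :
    create_verts grid t b =
      (grid.map (fun row => PySem.List.pyGetD row t ""),
       grid.map (fun row => PySem.List.pyGetD row b "")) := by
  unfold create_verts
  rw [PySem.List.foldl_pyRange_zero_pyGetD' grid []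
    (fun (p : List String × List String) row =>
      (p.1 ++ [PySem.List.pyGetD row t ""], p.2 ++ [PySem.List.pyGetD row b ""])) ([], [])]
  rw [PySem.List.foldl_prod_mk
    (f := fun acc row => acc ++ [PySem.List.pyGetD row t ""])
    (g := fun acc row => acc ++ [PySem.List.pyGetD row b ""])]
  rw [PySem.List.foldl_append_singleton_eq_map, PySem.List.foldl_append_singleton_eq_map]
  simp

-- a non-'vertical' tag behaves like 'horizontal' throughout B's loop
lemma altLoop_nonvert (grid : List (List String)) :
    ∀ n lo hi c rt, (hi - lo).toNat = n → rt ≠ "vertical" →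
      pvAltLoop rt grid lo hi c = pvAltLoop "horizontal" grid lo hi c := by
  intro n
  induction n using Nat.strong_induction_on with
  | _ n IH =>
    intro lo hi c rt hn hrt
    conv_lhs => rw [pvAltLoop]
    conv_rhs => rw [pvAltLoop]
    by_cases h : hi - lo ≥ 1
    · rw [if_pos h, if_pos h, if_neg hrt, if_neg hrt,
        if_neg (by decide : ¬ ("horizontal" = "vertical")),
        if_neg (by decide : ¬ ("horizontal" = "vertical"))]
      exact IH ((hi - 1) - (lo + 1)).toNat (by omega) _ _ _ _ rfl hrt
    · rw [if_neg h, if_neg h]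

-- main invariant: B's loop with accumulator c computes c + A's recursion
lemma altLoop_eq_check (grid : List (List String)) :
    ∀ n increment_this decrement_this c rt, (decrement_this - increment_this).toNat = n →
      pvAltLoop rt grid (increment_this + 1) (decrement_this - 1) c =
        c + check_in_between rt grid increment_this decrement_this := by
  intro n
  induction n using Nat.strong_induction_on with
  | _ n IH =>
    intro inc dec c rt hn
    rw [pvAltLoop, check_in_between]
    by_cases h : dec - 1 - (inc + 1) ≥ 1
    · rw [if_pos h]
      by_cases hrt : rt = "vertical"
      · subst hrt
        rw [if_pos rfl, if_pos rfl, if_pos rfl, if_pos h,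
          IH ((dec - 1) - (inc + 1)).toNat (by omega) (inc + 1) (dec - 1) _ "vertical" rfl]
        simp only [create_verts_eq_maps, compare_eq_count]
        omega
      · rw [if_neg hrt, if_neg hrt, if_neg hrt, if_pos h,
          altLoop_nonvert grid ((dec - 1 - 1) - (inc + 1 + 1)).toNat (inc + 1 + 1) (dec - 1 - 1) _ rt rfl hrt,
          IH ((dec - 1) - (inc + 1)).toNat (by omega) (inc + 1) (dec - 1) _ "horizontal" rfl,
          compare_eq_count]
        omega
    · rw [if_neg h]
      by_cases hrt : rt = "vertical"
      · subst hrt; rw [if_pos rfl, if_neg h]; omega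
      · rw [if_neg hrt, if_neg h]; omega

-- ===== VERDICT (by name: the statement is the Claim_ definition above) =====
theorem check_in_between_spec : Claim_equal_check_in_between := by
  intro rt grid inc dec _ _
  unfold Spec_check_in_between check_in_between_alt
  have := altLoop_eq_check grid (dec - inc).toNat inc dec 0 rt rfl
  omega
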